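-- pv_equiv track=rewrite | github.com/NishantSinghhhhh/precice_code | migrate_jekyll_to_hugo.py | _jekyll_date_to_go
-- ===== SOURCE A (Python) =====
-- def _jekyll_date_to_go(fmt):
--   """Convert a strftime-style date format string to Go's reference time format."""
--   mapping = {
--     '%Y': '2006', '%y': '06',
--     '%m': '01',   '%-m': '1',
--     '%d': '02',   '%-d': '2',
--     '%B': 'January', '%b': 'Jan',
--     '%A': 'Monday',  '%a': 'Mon',
--     '%H': '15',  '%I': '03',
--     '%M': '04',  '%S': '05',
--     '%p': 'PM',
--   }
--   result = fmt
--   for k, v in mapping.items():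
--     result = result.replace(k, v)
--   return result
-- ===== SOURCE B (Python) =====
-- def _jekyll_date_to_go(fmt):
--   """Convert a strftime-style date format string to Go's reference time format.
--
--   Single left-to-right scan instead of one full-string replace pass per key:
--   at each position try the 3-char token, then the 2-char token, else copy the
--   character through unchanged."""
--   go_of_strftime = dict([
--     ('%-m', '1'), ('%-d', '2'),
--     ('%Y', '2006'), ('%y', '06'), ('%m', '01'), ('%d', '02'),
--     ('%B', 'January'), ('%b', 'Jan'), ('%A', 'Monday'), ('%a', 'Mon'),
--     ('%H', '15'), ('%I', '03'), ('%M', '04'), ('%S', '05'), ('%p', 'PM'),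
--   ])
--   pieces = []
--   i = 0
--   while i < len(fmt):
--     tok = fmt[i:i + 3]
--     if tok not in go_of_strftime:
--       tok = fmt[i:i + 2]
--     if tok in go_of_strftime:
--       pieces.append(go_of_strftime[tok])
--       i += len(tok)
--     else:
--       pieces.append(fmt[i])
--       i += 1
--   return ''.join(pieces)
-- ===== Notes on version B (the rewrite author's own statement) =====
-- stated objective: alternative
-- what changed: Replaced the loop of 15 sequential full-string str.replace passes by a single left-to-right scan that matches the longest strftime token (3 chars, then 2) at each position and emits its Go value once, so each character is examined once and replacement values can never be re-matched.
-- intended difference: On inputs containing '%%A' or '%%a' (a literal '%' directly before the %A/%a token), A's later '%M' replace pass re-matches the '%'+'Monday'/'Mon' it just produced and returns '04onday'/'04on', while B returns the intended '%Monday'/'%Mon' (the inserted value must not be re-interpreted as a new token). — e.g. on _jekyll_date_to_go("%%A"): A returns "04onday", B returns "%Monday"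
import Mathlib
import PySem

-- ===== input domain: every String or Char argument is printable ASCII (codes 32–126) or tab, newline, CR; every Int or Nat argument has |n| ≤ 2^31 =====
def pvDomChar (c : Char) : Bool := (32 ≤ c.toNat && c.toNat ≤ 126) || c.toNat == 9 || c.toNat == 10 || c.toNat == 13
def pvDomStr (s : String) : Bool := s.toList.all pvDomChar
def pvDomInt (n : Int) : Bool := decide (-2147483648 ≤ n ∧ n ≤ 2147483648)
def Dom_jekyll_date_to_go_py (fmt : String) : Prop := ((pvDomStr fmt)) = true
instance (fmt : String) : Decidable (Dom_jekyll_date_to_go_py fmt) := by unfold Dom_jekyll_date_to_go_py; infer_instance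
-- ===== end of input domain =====

-- B replaces A's 15 sequential full-string replace passes by one left-to-right longest-token scan;
-- on inputs containing '%%A'/'%%a' A re-matches its own output ('04onday') while B returns the intended '%Monday' (see D_).

-- ===== PORT A =====
-- the dict literal of A, as an association list in insertion order
def jekyllMapping : List (String × String) :=
  [("%Y","2006"),("%y","06"),("%m","01"),("%-m","1"),("%d","02"),("%-d","2"),
   ("%B","January"),("%b","Jan"),("%A","Monday"),("%a","Mon"),
   ("%H","15"),("%I","03"),("%M","04"),("%S","05"),("%p","PM")]

def jekyll_date_to_go_py (fmt : String) : String :=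
  jekyllMapping.foldl (fun result kv => PySem.Str.replace result kv.1 kv.2) fmt

-- ===== PORT B =====
-- Source B's scanner: at each position try the 3-char token, then the 2-char token, else copy the char
def jekyllScan : List Char → List Char
  | '%' :: '-' :: 'm' :: t => '1' :: jekyllScan t
  | '%' :: '-' :: 'd' :: t => '2' :: jekyllScan t
  | '%' :: 'Y' :: t => '2' :: '0' :: '0' :: '6' :: jekyllScan t
  | '%' :: 'y' :: t => '0' :: '6' :: jekyllScan t
  | '%' :: 'm' :: t => '0' :: '1' :: jekyllScan t
  | '%' :: 'd' :: t => '0' :: '2' :: jekyllScan t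
  | '%' :: 'B' :: t => 'J' :: 'a' :: 'n' :: 'u' :: 'a' :: 'r' :: 'y' :: jekyllScan t
  | '%' :: 'b' :: t => 'J' :: 'a' :: 'n' :: jekyllScan t
  | '%' :: 'A' :: t => 'M' :: 'o' :: 'n' :: 'd' :: 'a' :: 'y' :: jekyllScan t
  | '%' :: 'a' :: t => 'M' :: 'o' :: 'n' :: jekyllScan t
  | '%' :: 'H' :: t => '1' :: '5' :: jekyllScan t
  | '%' :: 'I' :: t => '0' :: '3' :: jekyllScan t
  | '%' :: 'M' :: t => '0' :: '4' :: jekyllScan t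
  | '%' :: 'S' :: t => '0' :: '5' :: jekyllScan t
  | '%' :: 'p' :: t => 'P' :: 'M' :: jekyllScan t
  | c :: t => c :: jekyllScan t
  | [] => []

def jekyll_date_to_go_py_alt (fmt : String) : String :=
  String.ofList (jekyllScan fmt.toList)

-- ===== PRECONDITION & SPEC =====
-- On inputs containing '%%A' or '%%a', A returns the chained artefact ('%'+'Monday'/'Mon' re-matched by the
-- later '%M' pass, giving '04onday'/'04on') while B returns the intended '%Monday'/'%Mon'.
def D_jekyll_date_to_go_py (fmt : String) : Prop :=
  PySem.Str.isIn "%%A" fmt = true ∨ PySem.Str.isIn "%%a" fmt = true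
instance (fmt : String) : Decidable (D_jekyll_date_to_go_py fmt) := by
  unfold D_jekyll_date_to_go_py; infer_instance

def Spec_jekyll_date_to_go_py (fmt : String) (out : String) : Prop :=
  ¬ D_jekyll_date_to_go_py fmt → out = jekyll_date_to_go_py_alt fmt
instance (fmt : String) (out : String) : Decidable (Spec_jekyll_date_to_go_py fmt out) := by
  unfold Spec_jekyll_date_to_go_py; infer_instance

def pvDiffWitness_jekyll_date_to_go_py : String := "%%A"
def pvDiffWitnessOut_jekyll_date_to_go_py : String × String := ("04onday", "%Monday")

-- ===== CLAIM (what is proved, stated in full; the proofs are below) =====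
def Claim_unchanged_jekyll_date_to_go_py : Prop :=
  ∀ (fmt : String), Dom_jekyll_date_to_go_py fmt →
    Spec_jekyll_date_to_go_py fmt (jekyll_date_to_go_py fmt)

def Claim_changed_jekyll_date_to_go_py : Prop :=
  Dom_jekyll_date_to_go_py (pvDiffWitness_jekyll_date_to_go_py) ∧
  D_jekyll_date_to_go_py (pvDiffWitness_jekyll_date_to_go_py) ∧
  jekyll_date_to_go_py (pvDiffWitness_jekyll_date_to_go_py) = pvDiffWitnessOut_jekyll_date_to_go_py.1 ∧
  jekyll_date_to_go_py_alt (pvDiffWitness_jekyll_date_to_go_py) = pvDiffWitnessOut_jekyll_date_to_go_py.2 ∧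
  pvDiffWitnessOut_jekyll_date_to_go_py.1 ≠ pvDiffWitnessOut_jekyll_date_to_go_py.2

def Claim_exact_jekyll_date_to_go_py : Prop :=
  ∀ (fmt : String), Dom_jekyll_date_to_go_py fmt → D_jekyll_date_to_go_py fmt →
    jekyll_date_to_go_py fmt ≠ jekyll_date_to_go_py_alt fmt

-- ===== LEMMAS AND PROOFS =====

-- char-level mapping and the char-level chain of A's replace passes
def MC : List (List Char × List Char) :=
  [(['%','Y'],['2','0','0','6']), (['%','y'],['0','6']), (['%','m'],['0','1']),
   (['%','-','m'],['1']), (['%','d'],['0','2']), (['%','-','d'],['2']),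
   (['%','B'],['J','a','n','u','a','r','y']), (['%','b'],['J','a','n']),
   (['%','A'],['M','o','n','d','a','y']), (['%','a'],['M','o','n']),
   (['%','H'],['1','5']), (['%','I'],['0','3']), (['%','M'],['0','4']),
   (['%','S'],['0','5']), (['%','p'],['P','M'])]

def chainC (ps : List (List Char × List Char)) (cs : List Char) : List Char :=
  ps.foldl (fun r kv => PySem.Chars.replace r kv.1 kv.2) cs

-- "no '%%A' / '%%a' substring" at the char level
def NoBad (cs : List Char) : Prop :=
  ¬ (['%','%','A'] <:+: cs) ∧ ¬ (['%','%','a'] <:+: cs)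

lemma nobad_tail {c : Char} {t : List Char} (h : NoBad (c :: t)) : NoBad t := by
  constructor
  · intro ⟨s, r, hsr⟩; exact h.1 ⟨c :: s, r, by simp [← hsr]⟩
  · intro ⟨s, r, hsr⟩; exact h.2 ⟨c :: s, r, by simp [← hsr]⟩

lemma nobad_pct_heads {t : List Char} (h : NoBad ('%' :: '%' :: t)) :
    t.head? ≠ some 'A' ∧ t.head? ≠ some 'a' := by
  constructor <;> intro hh
  · cases t with
    | nil => simp at hh
    | cons a t' =>
      simp at hh; subst hh
      exact h.1 ⟨[], t', by simp⟩
  · cases t with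
    | nil => simp at hh
    | cons a t' =>
      simp at hh; subst hh
      exact h.2 ⟨[], t', by simp⟩

-- ---- equations and fuel facts for PySem.Chars.replace.go ----
lemma go_zero (o n l a : List Char) :
    PySem.Chars.replace.go o n 0 l a = a.reverse ++ l := by
  simp [PySem.Chars.replace.go]

lemma go_succ_nil (o n a : List Char) (f : Nat) :
    PySem.Chars.replace.go o n (f+1) [] a = a.reverse := by
  simp [PySem.Chars.replace.go]

lemma go_succ_cons (o n a t : List Char) (c : Char) (f : Nat) :
    PySem.Chars.replace.go o n (f+1) (c::t) a =
      if o.isPrefixOf (c::t) then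
        PySem.Chars.replace.go o n f ((c::t).drop o.length) (n.reverse ++ a)
      else PySem.Chars.replace.go o n f t (c::a) := by
  simp [PySem.Chars.replace.go]

lemma go_acc (o n : List Char) :
    ∀ (f : Nat) (l a : List Char),
      PySem.Chars.replace.go o n f l a = a.reverse ++ PySem.Chars.replace.go o n f l [] := by
  intro f
  induction f with
  | zero => intro l a; simp [go_zero]
  | succ f ih =>
    intro l a
    cases l with
    | nil => simp [go_succ_nil]
    | cons c t =>
      rw [go_succ_cons, go_succ_cons]
      by_cases h : o.isPrefixOf (c::t) = true
      · rw [if_pos h, if_pos h]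
        rw [ih _ (n.reverse ++ a), ih _ (n.reverse ++ [])]
        simp
      · rw [if_neg h, if_neg h]
        rw [ih _ (c::a), ih _ (c::[])]
        simp

lemma go_fuel (o n : List Char) (ho : o ≠ []) :
    ∀ (f : Nat) (l a : List Char), l.length ≤ f →
      PySem.Chars.replace.go o n f l a = PySem.Chars.replace.go o n l.length l a := by
  intro f
  induction f using Nat.strong_induction_on with
  | _ f ih =>
    intro l a hl
    match f, l with
    | 0, l =>
      have hnil : l = [] := by
        cases l with | nil => rfl | cons c t => simp at hl
      subst hnil; rfl
    | f+1, [] => simp [go_succ_nil, go_zero]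
    | f+1, c::t =>
      rcases Nat.eq_or_lt_of_le hl with heq | hlt
      · rw [← heq]
      · have hlf : t.length + 1 ≤ f := by
          simp only [List.length_cons] at hlt; omega
        rw [go_succ_cons, List.length_cons, go_succ_cons]
        have holen : 1 ≤ o.length := by
          cases o with | nil => exact absurd rfl ho | cons x xs => simp
        have hd : ((c::t).drop o.length).length ≤ t.length := by
          simp only [List.length_drop, List.length_cons]; omega
        by_cases h : o.isPrefixOf (c::t) = true
        · rw [if_pos h, if_pos h]
          rw [ih f (by omega) _ _ (by omega), ih t.length (by omega) _ _ (by omega)]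
        · rw [if_neg h, if_neg h]
          rw [ih f (by omega) _ _ (by omega), ih t.length (by omega) _ _ (by omega)]

lemma repl_nil (o n : List Char) (ho : o ≠ []) : PySem.Chars.replace [] o n = [] := by
  have : o.isEmpty = false := by cases o with | nil => exact absurd rfl ho | cons x xs => rfl
  simp [PySem.Chars.replace, this, go_zero]

lemma repl_skip {o : List Char} {c : Char} {t : List Char} (n : List Char)
    (h : o.isPrefixOf (c::t) = false) :
    PySem.Chars.replace (c::t) o n = c :: PySem.Chars.replace t o n := by
  have ho : o ≠ [] := by
    intro he; subst he; simp [List.isPrefixOf] at h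
  have hoe : o.isEmpty = false := by cases o with | nil => exact absurd rfl ho | cons x xs => rfl
  simp only [PySem.Chars.replace, hoe, Bool.false_eq_true, if_false]
  rw [show (c::t).length = t.length + 1 from rfl, go_succ_cons]
  simp only [h, Bool.false_eq_true, if_false]
  rw [go_acc]
  simp

lemma repl_match {o l : List Char} (n : List Char) (ho : o ≠ [])
    (h : o.isPrefixOf l = true) :
    PySem.Chars.replace l o n = n ++ PySem.Chars.replace (l.drop o.length) o n := by
  have hoe : o.isEmpty = false := by cases o with | nil => exact absurd rfl ho | cons x xs => rfl
  have holen : 1 ≤ o.length := by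
    cases o with | nil => exact absurd rfl ho | cons x xs => simp
  cases l with
  | nil =>
    exfalso; cases o with
    | nil => exact ho rfl
    | cons x xs => simp [List.isPrefixOf] at h
  | cons c t =>
    simp only [PySem.Chars.replace, hoe, Bool.false_eq_true, if_false]
    rw [show (c::t).length = t.length + 1 from rfl, go_succ_cons]
    simp only [h, if_true]
    have hd : ((c::t).drop o.length).length ≤ t.length := by
      simp only [List.length_drop, List.length_cons]; omega
    rw [go_fuel o n ho t.length _ _ hd, go_acc]
    simp

lemma repl_push {o : List Char} (n : List Char) (ho : o.head? = some '%') :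
    ∀ (v w : List Char), (∀ c ∈ v, c ≠ '%') →
      PySem.Chars.replace (v ++ w) o n = v ++ PySem.Chars.replace w o n := by
  intro v
  induction v with
  | nil => intro w _; simp
  | cons c v' ih =>
    intro w hv
    obtain ⟨os, rfl⟩ : ∃ os, o = '%' :: os := by
      cases o with
      | nil => simp at ho
      | cons x xs => simp at ho; exact ⟨xs, by rw [ho]⟩
    have hc : c ≠ '%' := hv c (by simp)
    have hpre : ('%'::os).isPrefixOf (c :: (v' ++ w)) = false := by
      simp [List.isPrefixOf]
      intro he; exact absurd he.symm hc
    rw [List.cons_append, repl_skip _ hpre, ih w (fun x hx => hv x (by simp [hx]))]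
    simp

-- ---- concrete facts about the mapping (kernel-checked) ----
lemma MC_vals : ∀ p ∈ MC, p.2 ≠ [] ∧ (∀ c ∈ p.2, c ≠ '%') := by
  intro p hp; fin_cases hp <;> exact ⟨by simp, by simp⟩

lemma MC_key_head : ∀ p ∈ MC, p.1.head? = some '%' ∧ p.1 ≠ [] := by
  intro p hp; fin_cases hp <;> exact ⟨rfl, by simp⟩

lemma MC_vhead : ∀ p ∈ MC, p.2.head?.getD ' ' ∈ (['2','0','1','J','M','P'] : List Char) := by
  intro p hp; fin_cases hp <;> simp

lemma MC_vhead_not_Aa : ∀ p ∈ MC, p.2.head? ≠ some 'A' ∧ p.2.head? ≠ some 'a' := by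
  intro p hp; fin_cases hp <;> exact ⟨by simp, by simp⟩

lemma MC_notMA : ∀ p ∈ MC, p.1 ≠ ['%','A'] → p.1 ≠ ['%','a'] → p.2.head? ≠ some 'M' := by
  intro p hp; fin_cases hp <;> simp

-- ---- chain-level structural lemmas ----
lemma chain_snoc (ps : List (List Char × List Char)) (p : List Char × List Char) (cs : List Char) :
    chainC (ps ++ [p]) cs = PySem.Chars.replace (chainC ps cs) p.1 p.2 := by
  simp [chainC, List.foldl_append]

lemma chain_nil' {ps : List (List Char × List Char)} (hps : ∀ p ∈ ps, p ∈ MC) :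
    chainC ps [] = [] := by
  induction ps with
  | nil => rfl
  | cons p ps ih =>
    have hk := (MC_key_head p (hps p (by simp))).2
    show chainC ps (PySem.Chars.replace [] p.1 p.2) = []
    rw [repl_nil _ _ hk]
    exact ih (fun q hq => hps q (by simp [hq]))

lemma chain_push {ps : List (List Char × List Char)} (hps : ∀ p ∈ ps, p ∈ MC) :
    ∀ (v w : List Char), (∀ c ∈ v, c ≠ '%') →
      chainC ps (v ++ w) = v ++ chainC ps w := by
  induction ps with
  | nil => intro v w _; rfl
  | cons p ps ih =>
    intro v w hv
    have hk := (MC_key_head p (hps p (by simp))).1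
    show chainC ps (PySem.Chars.replace (v ++ w) p.1 p.2) = v ++ chainC ps (PySem.Chars.replace w p.1 p.2)
    rw [repl_push _ hk v w hv]
    exact ih (fun q hq => hps q (by simp [hq])) v _ hv

lemma chain_cons_push {ps : List (List Char × List Char)} (hps : ∀ p ∈ ps, p ∈ MC)
    {c : Char} (hc : c ≠ '%') (w : List Char) :
    chainC ps (c :: w) = c :: chainC ps w := by
  have := chain_push hps [c] w (by simpa using hc)
  simpa using this

-- ---- shape facts about the mapping keys ----
lemma MC_shape : ∀ p ∈ MC, ∃ z zs, p.1 = '%' :: z :: zs ∧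
    z ∈ (['Y','y','m','-','d','B','b','A','a','H','I','M','S','p'] : List Char) ∧
    (zs = [] ∨ ∃ zc, zs = [zc] ∧ zc ∈ (['m','d'] : List Char)) ∧
    (z = '-' → ∃ zc, zs = [zc] ∧ zc ∈ (['m','d'] : List Char)) ∧
    (z ≠ '-' → zs = []) := by
  intro p hp
  fin_cases hp <;>
    first
      | exact ⟨'-', ['m'], rfl, by simp, Or.inr ⟨'m', rfl, by simp⟩,
          fun _ => ⟨'m', rfl, by simp⟩, fun h => absurd rfl h⟩
      | exact ⟨'-', ['d'], rfl, by simp, Or.inr ⟨'d', rfl, by simp⟩,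
          fun _ => ⟨'d', rfl, by simp⟩, fun h => absurd rfl h⟩
      | exact ⟨_, [], rfl, by simp, Or.inl rfl, fun h => absurd h (by decide), fun _ => rfl⟩

-- ---- the main invariant: what the chain does to a string starting with '%' ----
-- Either no key has matched at the front (the '%' is still there, the chain acts on the tail),
-- or some mapping key matched a prefix of the ORIGINAL string and the front is its value.

-- '%' followed by a char that starts no token: no key matches the front
lemma no_match_other {c₂ : Char} {u : List Char} {ps : List (List Char × List Char)}
    (hps : ∀ p ∈ ps, p ∈ MC)
    (hc2 : c₂ ∉ (['%','-','Y','y','m','d','B','b','A','a','H','I','M','S','p'] : List Char)) :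
    ∀ k v, (k, v) ∈ MC → k.isPrefixOf ('%' :: chainC ps (c₂ :: u)) = false := by
  intro k v hkv
  have hc2p : c₂ ≠ '%' := fun h => hc2 (by simp [h])
  rw [chain_cons_push hps hc2p u]
  obtain ⟨z, zs, hk, hzmem, -, -, -⟩ := MC_shape (k, v) hkv
  simp only at hk; subst hk
  have hne : z ≠ c₂ := by
    intro h; subst h
    fin_cases hzmem <;> simp_all
  simp [List.isPrefixOf, hne]

-- push a literal '%' through the whole chain when no key can ever match at the front
lemma pct_push {x : List Char}
    (h : ∀ (ps : List (List Char × List Char)), (∀ p ∈ ps, p ∈ MC) →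
          ∀ k v, (k, v) ∈ MC → k.isPrefixOf ('%' :: chainC ps x) = false) :
    ∀ (ps : List (List Char × List Char)), (∀ p ∈ ps, p ∈ MC) →
      chainC ps ('%' :: x) = '%' :: chainC ps x := by
  intro ps
  induction ps using List.reverseRecOn with
  | nil => intro _; rfl
  | append_singleton ps p ih =>
    intro hps
    have hps' : ∀ q ∈ ps, q ∈ MC := fun q hq => hps q (by simp [hq])
    obtain ⟨k, v⟩ := p
    have hpre : k.isPrefixOf ('%' :: chainC ps x) = false :=
      h ps hps' k v (hps (k, v) (by simp))
    rw [chain_snoc, chain_snoc, ih hps', repl_skip _ hpre]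

-- head of a chained string: either the original head survives, or the front is some mapping value
lemma headw (ps : List (List Char × List Char)) (hps : ∀ p ∈ ps, p ∈ MC) (w : List Char) :
    (chainC ps w).head? = w.head? ∨ ∃ q ∈ MC, ∃ rest, chainC ps w = q.2 ++ rest := by
  induction ps using List.reverseRecOn with
  | nil => left; rfl
  | append_singleton ps p ih =>
    have hps' : ∀ q ∈ ps, q ∈ MC := fun q hq => hps q (by simp [hq])
    have hpMC : p ∈ MC := hps p (by simp)
    rcases ih hps' with h1 | ⟨q, hqMC, rest, hEq⟩
    · cases hY : chainC ps w with
      | nil =>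
        left
        rw [chain_snoc, hY, repl_nil _ _ (MC_key_head p hpMC).2]
        rw [hY] at h1; exact h1
      | cons h Y' =>
        by_cases hpre : p.1.isPrefixOf (h :: Y') = true
        · right
          exact ⟨p, hpMC, _, by
            rw [chain_snoc, hY, repl_match p.2 (MC_key_head p hpMC).2 hpre]⟩
        · left
          rw [chain_snoc, hY, repl_skip _ (by rwa [Bool.not_eq_true] at hpre)]
          rw [hY] at h1; simpa using h1
    · obtain ⟨hqne, hqpct⟩ := MC_vals q hqMC
      right
      refine ⟨q, hqMC, PySem.Chars.replace rest p.1 p.2, ?_⟩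
      rw [chain_snoc, hEq, repl_push p.2 (MC_key_head p hpMC).1 q.2 rest hqpct]

-- the leading '%' of '%'::t survives the whole chain, or the front is the value of a key other
-- than %A/%a (whose values are the only ones starting with 'M'), provided t does not start A/a
lemma inv2 (ps : List (List Char × List Char)) (hps : ∀ p ∈ ps, p ∈ MC)
    (t : List Char) (hA : t.head? ≠ some 'A') (ha : t.head? ≠ some 'a') :
    chainC ps ('%' :: t) = '%' :: chainC ps t ∨
    ∃ q ∈ MC, ∃ rest, chainC ps ('%' :: t) = q.2 ++ rest ∧ q.2.head? ≠ some 'M' := by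
  induction ps using List.reverseRecOn with
  | nil => left; rfl
  | append_singleton ps p ih =>
    have hps' : ∀ q ∈ ps, q ∈ MC := fun q hq => hps q (by simp [hq])
    have hpMC : p ∈ MC := hps p (by simp)
    rcases ih hps' with hD1 | ⟨q, hqMC, rest, hEq, hqM⟩
    · by_cases hpre : p.1.isPrefixOf ('%' :: chainC ps t) = true
      · -- a key matched the front; it cannot be %A or %a
        have hZA : ∀ (c : Char), (chainC ps t).head? = some c → c ≠ 'A' ∧ c ≠ 'a' := by
          intro c hc
          rcases headw ps hps' t with hh | ⟨q', hq'MC, rest', hEq'⟩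
          · rw [hc] at hh
            exact ⟨fun h => hA (by rw [← hh, h]), fun h => ha (by rw [← hh, h])⟩
          · obtain ⟨hq'ne, -⟩ := MC_vals q' hq'MC
            obtain ⟨hA', ha'⟩ := MC_vhead_not_Aa q' hq'MC
            cases hq2' : q'.2 with
            | nil => exact absurd hq2' hq'ne
            | cons hh2 v₂ =>
              rw [hEq', hq2'] at hc
              simp at hc
              constructor
              · intro h; apply hA'; simp [hq2', hc, h]
              · intro h; apply ha'; simp [hq2', hc, h]
        have hpA : p.1 ≠ ['%','A'] := by
          intro h
          rw [h] at hpre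
          cases hZ : chainC ps t with
          | nil => rw [hZ] at hpre; simp [List.isPrefixOf] at hpre
          | cons zh Z' =>
            rw [hZ] at hpre
            have hzh : 'A' = zh := by simpa [List.isPrefixOf] using hpre
            exact (hZA zh (by rw [hZ]; rfl)).1 hzh.symm
        have hpa : p.1 ≠ ['%','a'] := by
          intro h
          rw [h] at hpre
          cases hZ : chainC ps t with
          | nil => rw [hZ] at hpre; simp [List.isPrefixOf] at hpre
          | cons zh Z' =>
            rw [hZ] at hpre
            have hzh : 'a' = zh := by simpa [List.isPrefixOf] using hpre
            exact (hZA zh (by rw [hZ]; rfl)).2 hzh.symm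
        right
        exact ⟨p, hpMC, _, by
          rw [chain_snoc, hD1]
          exact repl_match p.2 (MC_key_head p hpMC).2 hpre, MC_notMA p hpMC hpA hpa⟩
      · left
        rw [chain_snoc, chain_snoc, hD1, repl_skip _ (by rwa [Bool.not_eq_true] at hpre)]
    · obtain ⟨hqne, hqpct⟩ := MC_vals q hqMC
      right
      exact ⟨q, hqMC, _, by
        rw [chain_snoc, hEq]
        exact repl_push p.2 (MC_key_head p hpMC).1 q.2 rest hqpct, hqM⟩

-- no key matches at the front of '%' :: chainC ps ('%'::t) when t does not start with A/a
lemma no_match_pct_weak {t : List Char} (hA : t.head? ≠ some 'A') (ha : t.head? ≠ some 'a')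
    (ps : List (List Char × List Char)) (hps : ∀ p ∈ ps, p ∈ MC) :
    ∀ k v, (k, v) ∈ MC → k.isPrefixOf ('%' :: chainC ps ('%' :: t)) = false := by
  intro k v hkv
  obtain ⟨z, zs, hk, hzmem, -, -, -⟩ := MC_shape (k, v) hkv
  simp only at hk; subst hk
  rcases inv2 ps hps t hA ha with hD1 | ⟨q, hqMC, rest, hEq, hqM⟩
  · rw [hD1]
    have hz1 : z ≠ '%' := by fin_cases hzmem <;> decide
    simp [List.isPrefixOf, hz1]
  · obtain ⟨hqne, -⟩ := MC_vals q hqMC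
    cases hq2 : q.2 with
    | nil => exact absurd hq2 hqne
    | cons h v₂ =>
      rw [hEq, hq2]
      have hhVH : h ∈ (['2','0','1','J','M','P'] : List Char) := by
        have := MC_vhead q hqMC; rw [hq2] at this; simpa using this
      have hhM : h ≠ 'M' := by rw [hq2] at hqM; simpa using hqM
      have hzh : z ≠ h := by
        intro h'; subst h'
        fin_cases hzmem <;> simp_all
      simp [List.isPrefixOf, hzh]

-- no key matches at the front of '%' :: chainC ps ('-'::u) when u does not start with m/d
lemma no_match_dash_weak {u : List Char} (hu : ∀ c, u.head? = some c → c ≠ 'm' ∧ c ≠ 'd')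
    (ps : List (List Char × List Char)) (hps : ∀ p ∈ ps, p ∈ MC) :
    ∀ k v, (k, v) ∈ MC → k.isPrefixOf ('%' :: chainC ps ('-' :: u)) = false := by
  intro k v hkv
  rw [chain_cons_push hps (by decide) u]
  obtain ⟨z, zs, hk, hzmem, -, hdash, -⟩ := MC_shape (k, v) hkv
  simp only at hk; subst hk
  by_cases hzd : z = '-'
  · subst hzd
    obtain ⟨zc, rfl, hzcmem⟩ := hdash rfl
    have hfront : ([zc] : List Char).isPrefixOf (chainC ps u) = false := by
      rcases headw ps hps u with hh | ⟨q, hqMC, rest, hEq⟩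
      · cases hZ : chainC ps u with
        | nil => simp [List.isPrefixOf]
        | cons h Z' =>
          rw [hZ] at hh
          have hmd := hu h hh.symm
          have hne : zc ≠ h := by
            fin_cases hzcmem
            · exact fun he => hmd.1 he.symm
            · exact fun he => hmd.2 he.symm
          simp [List.isPrefixOf, hne]
      · obtain ⟨hqne, -⟩ := MC_vals q hqMC
        cases hq2 : q.2 with
        | nil => exact absurd hq2 hqne
        | cons h v₂ =>
          rw [hEq, hq2]
          have hhVH : h ∈ (['2','0','1','J','M','P'] : List Char) := by
            have := MC_vhead q hqMC; rw [hq2] at this; simpa using this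
          have hne : zc ≠ h := by
            intro he
            rw [he] at hzcmem
            fin_cases hhVH <;> simp_all
          simp [List.isPrefixOf, hne]
    simpa [List.isPrefixOf] using hfront
  · simp [List.isPrefixOf, hzd]

lemma chainK_Y (t : List Char) :
    chainC MC ('%' :: 'Y' :: t) = '2'::'0'::'0'::'6' :: chainC MC t := by
  simp only [chainC, MC, List.foldl]
  simp [repl_skip, repl_match, List.isPrefixOf]
lemma chainK_y (t : List Char) :
    chainC MC ('%' :: 'y' :: t) = '0'::'6' :: chainC MC t := by
  simp only [chainC, MC, List.foldl]
  simp [repl_skip, repl_match, List.isPrefixOf]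
lemma chainK_m (t : List Char) :
    chainC MC ('%' :: 'm' :: t) = '0'::'1' :: chainC MC t := by
  simp only [chainC, MC, List.foldl]
  simp [repl_skip, repl_match, List.isPrefixOf]
lemma chainK_d (t : List Char) :
    chainC MC ('%' :: 'd' :: t) = '0'::'2' :: chainC MC t := by
  simp only [chainC, MC, List.foldl]
  simp [repl_skip, repl_match, List.isPrefixOf]
lemma chainK_B (t : List Char) :
    chainC MC ('%' :: 'B' :: t) = 'J'::'a'::'n'::'u'::'a'::'r'::'y' :: chainC MC t := by
  simp only [chainC, MC, List.foldl]
  simp [repl_skip, repl_match, List.isPrefixOf]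
lemma chainK_b (t : List Char) :
    chainC MC ('%' :: 'b' :: t) = 'J'::'a'::'n' :: chainC MC t := by
  simp only [chainC, MC, List.foldl]
  simp [repl_skip, repl_match, List.isPrefixOf]
lemma chainK_A (t : List Char) :
    chainC MC ('%' :: 'A' :: t) = 'M'::'o'::'n'::'d'::'a'::'y' :: chainC MC t := by
  simp only [chainC, MC, List.foldl]
  simp [repl_skip, repl_match, List.isPrefixOf]
lemma chainK_a (t : List Char) :
    chainC MC ('%' :: 'a' :: t) = 'M'::'o'::'n' :: chainC MC t := by
  simp only [chainC, MC, List.foldl]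
  simp [repl_skip, repl_match, List.isPrefixOf]
lemma chainK_H (t : List Char) :
    chainC MC ('%' :: 'H' :: t) = '1'::'5' :: chainC MC t := by
  simp only [chainC, MC, List.foldl]
  simp [repl_skip, repl_match, List.isPrefixOf]
lemma chainK_I (t : List Char) :
    chainC MC ('%' :: 'I' :: t) = '0'::'3' :: chainC MC t := by
  simp only [chainC, MC, List.foldl]
  simp [repl_skip, repl_match, List.isPrefixOf]
lemma chainK_M (t : List Char) :
    chainC MC ('%' :: 'M' :: t) = '0'::'4' :: chainC MC t := by
  simp only [chainC, MC, List.foldl]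
  simp [repl_skip, repl_match, List.isPrefixOf]
lemma chainK_S (t : List Char) :
    chainC MC ('%' :: 'S' :: t) = '0'::'5' :: chainC MC t := by
  simp only [chainC, MC, List.foldl]
  simp [repl_skip, repl_match, List.isPrefixOf]
lemma chainK_p (t : List Char) :
    chainC MC ('%' :: 'p' :: t) = 'P'::'M' :: chainC MC t := by
  simp only [chainC, MC, List.foldl]
  simp [repl_skip, repl_match, List.isPrefixOf]
lemma chainK3_m (t : List Char) :
    chainC MC ('%' :: '-' :: 'm' :: t) = '1' :: chainC MC t := by
  simp only [chainC, MC, List.foldl]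
  simp [repl_skip, repl_match, List.isPrefixOf]
lemma chainK3_d (t : List Char) :
    chainC MC ('%' :: '-' :: 'd' :: t) = '2' :: chainC MC t := by
  simp only [chainC, MC, List.foldl]
  simp [repl_skip, repl_match, List.isPrefixOf]
-- scan computation lemmas
lemma scan_default {c : Char} {t : List Char} (hc : c ≠ '%') :
    jekyllScan (c :: t) = c :: jekyllScan t := by
  rw [jekyllScan.eq_def]
  split <;> simp_all

lemma scan_pct (t : List Char) : jekyllScan ('%' :: '%' :: t) = '%' :: jekyllScan ('%' :: t) := rfl

lemma scan_nonkey {c₂ : Char} (t : List Char)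
    (h : c₂ ∉ (['%','-','Y','y','m','d','B','b','A','a','H','I','M','S','p'] : List Char)) :
    jekyllScan ('%' :: c₂ :: t) = '%' :: jekyllScan (c₂ :: t) := by
  rw [jekyllScan.eq_def]
  split <;> (try simp_all) <;> (rename_i heq; exact heq.1.symm)

lemma scan_dash_other {c₃ : Char} (t : List Char) (h1 : c₃ ≠ 'm') (h2 : c₃ ≠ 'd') :
    jekyllScan ('%' :: '-' :: c₃ :: t) = '%' :: jekyllScan ('-' :: c₃ :: t) := by
  rw [jekyllScan.eq_def]
  split <;> (try simp_all) <;> (rename_i heq; exact heq.1.symm)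

-- chain corollaries via pct_push
lemma chain_pct {t : List Char} (hA : t.head? ≠ some 'A') (ha : t.head? ≠ some 'a') :
    chainC MC ('%' :: '%' :: t) = '%' :: chainC MC ('%' :: t) :=
  pct_push (fun ps hps k v hkv => no_match_pct_weak hA ha ps hps k v hkv) MC (fun _ hp => hp)

lemma chain_dash {c₃ : Char} {t : List Char} (h1 : c₃ ≠ 'm') (h2 : c₃ ≠ 'd') :
    chainC MC ('%' :: '-' :: c₃ :: t) = '%' :: chainC MC ('-' :: c₃ :: t) :=
  pct_push (fun ps hps k v hkv =>
    no_match_dash_weak (fun c hc => by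
      simp at hc; subst hc; exact ⟨h1, h2⟩) ps hps k v hkv) MC (fun _ hp => hp)

lemma chain_nonkey {c₂ : Char} (t : List Char)
    (h : c₂ ∉ (['%','-','Y','y','m','d','B','b','A','a','H','I','M','S','p'] : List Char)) :
    chainC MC ('%' :: c₂ :: t) = '%' :: chainC MC (c₂ :: t) :=
  pct_push (fun _ hps k v hkv => no_match_other hps h k v hkv) MC (fun _ hp => hp)

-- the main equivalence at the char level
lemma chain_eq_scan : ∀ (N : Nat) (u : List Char), u.length < N → NoBad u →
    chainC MC u = jekyllScan u := by
  intro N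
  induction N with
  | zero => intro u hu; omega
  | succ N ih =>
    intro u hu hnb
    match u with
    | [] => rw [chain_nil' (fun _ hp => hp)]; rfl
    | c :: t =>
      by_cases hc : c = '%'
      case neg =>
        rw [chain_cons_push (fun _ hp => hp) hc t, scan_default hc,
          ih t (by simp at hu; omega) (nobad_tail hnb)]
      case pos =>
      subst hc
      match t with
      | [] => decide
      | c₂ :: t₂ =>
      by_cases h2 : c₂ = '%'
      · subst h2
        rw [chain_pct (nobad_pct_heads hnb).1 (nobad_pct_heads hnb).2, scan_pct,
          ih ('%' :: t₂) (by simp at hu ⊢; omega) (nobad_tail hnb)]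
      by_cases hY : c₂ = 'Y'
      · subst hY
        rw [chainK_Y, ih t₂ (by simp at hu; omega) (nobad_tail (nobad_tail hnb))]
        rfl
      by_cases hy : c₂ = 'y'
      · subst hy
        rw [chainK_y, ih t₂ (by simp at hu; omega) (nobad_tail (nobad_tail hnb))]
        rfl
      by_cases hm : c₂ = 'm'
      · subst hm
        rw [chainK_m, ih t₂ (by simp at hu; omega) (nobad_tail (nobad_tail hnb))]
        rfl
      by_cases hd : c₂ = 'd'
      · subst hd
        rw [chainK_d, ih t₂ (by simp at hu; omega) (nobad_tail (nobad_tail hnb))]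
        rfl
      by_cases hB : c₂ = 'B'
      · subst hB
        rw [chainK_B, ih t₂ (by simp at hu; omega) (nobad_tail (nobad_tail hnb))]
        rfl
      by_cases hb : c₂ = 'b'
      · subst hb
        rw [chainK_b, ih t₂ (by simp at hu; omega) (nobad_tail (nobad_tail hnb))]
        rfl
      by_cases hA : c₂ = 'A'
      · subst hA
        rw [chainK_A, ih t₂ (by simp at hu; omega) (nobad_tail (nobad_tail hnb))]
        rfl
      by_cases ha : c₂ = 'a'
      · subst ha
        rw [chainK_a, ih t₂ (by simp at hu; omega) (nobad_tail (nobad_tail hnb))]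
        rfl
      by_cases hH : c₂ = 'H'
      · subst hH
        rw [chainK_H, ih t₂ (by simp at hu; omega) (nobad_tail (nobad_tail hnb))]
        rfl
      by_cases hI : c₂ = 'I'
      · subst hI
        rw [chainK_I, ih t₂ (by simp at hu; omega) (nobad_tail (nobad_tail hnb))]
        rfl
      by_cases hM : c₂ = 'M'
      · subst hM
        rw [chainK_M, ih t₂ (by simp at hu; omega) (nobad_tail (nobad_tail hnb))]
        rfl
      by_cases hS : c₂ = 'S'
      · subst hS
        rw [chainK_S, ih t₂ (by simp at hu; omega) (nobad_tail (nobad_tail hnb))]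
        rfl
      by_cases hp : c₂ = 'p'
      · subst hp
        rw [chainK_p, ih t₂ (by simp at hu; omega) (nobad_tail (nobad_tail hnb))]
        rfl
      by_cases hdash : c₂ = '-'
      · subst hdash
        match t₂ with
        | [] => decide
        | c₃ :: t₃ =>
        by_cases h3m : c₃ = 'm'
        · subst h3m
          rw [chainK3_m, ih t₃ (by simp at hu; omega) (nobad_tail (nobad_tail (nobad_tail hnb)))]
          rfl
        by_cases h3d : c₃ = 'd'
        · subst h3d
          rw [chainK3_d, ih t₃ (by simp at hu; omega) (nobad_tail (nobad_tail (nobad_tail hnb)))]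
          rfl
        rw [chain_dash h3m h3d, scan_dash_other t₃ h3m h3d,
          ih ('-' :: c₃ :: t₃) (by simp at hu ⊢; omega) (nobad_tail hnb)]
      have hns : c₂ ∉ (['%','-','Y','y','m','d','B','b','A','a','H','I','M','S','p'] : List Char) := by
        simp_all
      rw [chain_nonkey t₂ hns, scan_nonkey t₂ hns,
        ih (c₂ :: t₂) (by simp at hu ⊢; omega) (nobad_tail hnb)]


-- ---- the strict difference on inputs containing '%%A' / '%%a' ----
def BadL (cs : List Char) : Prop := (['%','%','A'] <:+: cs) ∨ (['%','%','a'] <:+: cs)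

lemma not_badl_short {cs : List Char} (h : cs.length < 3) : ¬ BadL cs := by
  rintro (hin | hin) <;> · have := hin.length_le; simp at this; omega

lemma badl_cons {c : Char} {t : List Char} (hb : BadL (c :: t)) (hc : c ≠ '%') : BadL t := by
  rcases hb with ⟨s, r, eq⟩ | ⟨s, r, eq⟩
  · cases s with
    | nil =>
      exfalso
      simp only [List.nil_append, List.cons_append] at eq
      injection eq with h1 _
      exact hc h1.symm
    | cons s0 s' =>
      left
      refine ⟨s', r, ?_⟩
      rw [List.cons_append, List.cons_append] at eq
      exact (List.cons.injEq _ _ _ _ ▸ eq).2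
  · cases s with
    | nil =>
      exfalso
      simp only [List.nil_append, List.cons_append] at eq
      injection eq with h1 _
      exact hc h1.symm
    | cons s0 s' =>
      right
      refine ⟨s', r, ?_⟩
      rw [List.cons_append, List.cons_append] at eq
      exact (List.cons.injEq _ _ _ _ ▸ eq).2

lemma badl_drop_pct {u : List Char} (hb : BadL ('%' :: u)) (hu : u.head? ≠ some '%') :
    BadL u := by
  rcases hb with ⟨s, r, eq⟩ | ⟨s, r, eq⟩
  · cases s with
    | nil =>
      exfalso; apply hu
      simp only [List.nil_append, List.cons_append] at eq
      injection eq with h1 h2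
      rw [← h2]; rfl
    | cons s0 s' =>
      left
      refine ⟨s', r, ?_⟩
      rw [List.cons_append, List.cons_append] at eq
      exact (List.cons.injEq _ _ _ _ ▸ eq).2
  · cases s with
    | nil =>
      exfalso; apply hu
      simp only [List.nil_append, List.cons_append] at eq
      injection eq with h1 h2
      rw [← h2]; rfl
    | cons s0 s' =>
      right
      refine ⟨s', r, ?_⟩
      rw [List.cons_append, List.cons_append] at eq
      exact (List.cons.injEq _ _ _ _ ▸ eq).2

lemma badl_pct2 {t : List Char} (hb : BadL ('%' :: '%' :: t))
    (hA : t.head? ≠ some 'A') (ha : t.head? ≠ some 'a') : BadL ('%' :: t) := by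
  rcases hb with ⟨s, r, eq⟩ | ⟨s, r, eq⟩
  · cases s with
    | nil =>
      exfalso; apply hA
      simp only [List.nil_append, List.cons_append] at eq
      injection eq with _ h2
      injection h2 with _ h3
      rw [← h3]; rfl
    | cons s0 s' =>
      left
      refine ⟨s', r, ?_⟩
      rw [List.cons_append, List.cons_append] at eq
      exact (List.cons.injEq _ _ _ _ ▸ eq).2
  · cases s with
    | nil =>
      exfalso; apply ha
      simp only [List.nil_append, List.cons_append] at eq
      injection eq with _ h2
      injection h2 with _ h3
      rw [← h3]; rfl
    | cons s0 s' =>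
      right
      refine ⟨s', r, ?_⟩
      rw [List.cons_append, List.cons_append] at eq
      exact (List.cons.injEq _ _ _ _ ▸ eq).2

-- on '%%A…' the chain's output starts with '0' (the %M pass re-matched '%'+'Monday'),
-- the scan's output with the literal '%'
lemma chain_badA (t : List Char) :
    (chainC MC ('%' :: '%' :: 'A' :: t)).head? = some '0' := by
  simp only [chainC, MC, List.foldl]
  simp [repl_skip, repl_match, List.isPrefixOf]

lemma chain_bada (t : List Char) :
    (chainC MC ('%' :: '%' :: 'a' :: t)).head? = some '0' := by
  simp only [chainC, MC, List.foldl]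
  simp [repl_skip, repl_match, List.isPrefixOf]

lemma chain_ne_scan : ∀ (N : Nat) (u : List Char), u.length < N → BadL u →
    chainC MC u ≠ jekyllScan u := by
  intro N
  induction N with
  | zero => intro u hu; omega
  | succ N ih =>
    intro u hu hb
    match u with
    | [] => exact absurd hb (not_badl_short (by simp))
    | c :: t =>
      by_cases hc : c = '%'
      case neg =>
        rw [chain_cons_push (fun _ hp => hp) hc t, scan_default hc]
        intro heq
        simp only [List.cons.injEq, true_and] at heq
        exact ih t (by simp at hu; omega) (badl_cons hb hc) heq
      case pos =>
      subst hc
      match t with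
      | [] => exact absurd hb (not_badl_short (by simp))
      | c₂ :: t₂ =>
      by_cases h2 : c₂ = '%'
      · subst h2
        match t₂ with
        | [] => exact absurd hb (not_badl_short (by simp))
        | c₃ :: t₃ =>
          by_cases h3A : c₃ = 'A'
          · subst h3A
            intro heq
            have h1 := chain_badA t₃
            rw [heq, scan_pct] at h1
            simp at h1
          by_cases h3a : c₃ = 'a'
          · subst h3a
            intro heq
            have h1 := chain_bada t₃
            rw [heq, scan_pct] at h1
            simp at h1
          rw [chain_pct (by simp [h3A]) (by simp [h3a]), scan_pct]
          intro heq
          simp only [List.cons.injEq, true_and] at heq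
          exact ih ('%' :: c₃ :: t₃) (by simp at hu ⊢; omega)
            (badl_pct2 hb (by simp [h3A]) (by simp [h3a])) heq
      by_cases hkY : c₂ = 'Y'
      · subst hkY
        rw [chainK_Y]
        intro heq
        rw [show jekyllScan ('%' :: 'Y' :: t₂) = '2'::'0'::'0'::'6' :: jekyllScan t₂ from rfl] at heq
        simp only [List.cons.injEq, true_and] at heq
        exact ih t₂ (by simp at hu; omega)
          (badl_cons (badl_drop_pct hb (by simp)) (by decide)) heq
      by_cases hky : c₂ = 'y'
      · subst hky
        rw [chainK_y]
        intro heq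
        rw [show jekyllScan ('%' :: 'y' :: t₂) = '0'::'6' :: jekyllScan t₂ from rfl] at heq
        simp only [List.cons.injEq, true_and] at heq
        exact ih t₂ (by simp at hu; omega)
          (badl_cons (badl_drop_pct hb (by simp)) (by decide)) heq
      by_cases hkm : c₂ = 'm'
      · subst hkm
        rw [chainK_m]
        intro heq
        rw [show jekyllScan ('%' :: 'm' :: t₂) = '0'::'1' :: jekyllScan t₂ from rfl] at heq
        simp only [List.cons.injEq, true_and] at heq
        exact ih t₂ (by simp at hu; omega)
          (badl_cons (badl_drop_pct hb (by simp)) (by decide)) heq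
      by_cases hkd : c₂ = 'd'
      · subst hkd
        rw [chainK_d]
        intro heq
        rw [show jekyllScan ('%' :: 'd' :: t₂) = '0'::'2' :: jekyllScan t₂ from rfl] at heq
        simp only [List.cons.injEq, true_and] at heq
        exact ih t₂ (by simp at hu; omega)
          (badl_cons (badl_drop_pct hb (by simp)) (by decide)) heq
      by_cases hkB : c₂ = 'B'
      · subst hkB
        rw [chainK_B]
        intro heq
        rw [show jekyllScan ('%' :: 'B' :: t₂) = 'J'::'a'::'n'::'u'::'a'::'r'::'y' :: jekyllScan t₂ from rfl] at heq
        simp only [List.cons.injEq, true_and] at heq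
        exact ih t₂ (by simp at hu; omega)
          (badl_cons (badl_drop_pct hb (by simp)) (by decide)) heq
      by_cases hkb : c₂ = 'b'
      · subst hkb
        rw [chainK_b]
        intro heq
        rw [show jekyllScan ('%' :: 'b' :: t₂) = 'J'::'a'::'n' :: jekyllScan t₂ from rfl] at heq
        simp only [List.cons.injEq, true_and] at heq
        exact ih t₂ (by simp at hu; omega)
          (badl_cons (badl_drop_pct hb (by simp)) (by decide)) heq
      by_cases hkA : c₂ = 'A'
      · subst hkA
        rw [chainK_A]
        intro heq
        rw [show jekyllScan ('%' :: 'A' :: t₂) = 'M'::'o'::'n'::'d'::'a'::'y' :: jekyllScan t₂ from rfl] at heq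
        simp only [List.cons.injEq, true_and] at heq
        exact ih t₂ (by simp at hu; omega)
          (badl_cons (badl_drop_pct hb (by simp)) (by decide)) heq
      by_cases hka : c₂ = 'a'
      · subst hka
        rw [chainK_a]
        intro heq
        rw [show jekyllScan ('%' :: 'a' :: t₂) = 'M'::'o'::'n' :: jekyllScan t₂ from rfl] at heq
        simp only [List.cons.injEq, true_and] at heq
        exact ih t₂ (by simp at hu; omega)
          (badl_cons (badl_drop_pct hb (by simp)) (by decide)) heq
      by_cases hkH : c₂ = 'H'
      · subst hkH
        rw [chainK_H]
        intro heq
        rw [show jekyllScan ('%' :: 'H' :: t₂) = '1'::'5' :: jekyllScan t₂ from rfl] at heq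
        simp only [List.cons.injEq, true_and] at heq
        exact ih t₂ (by simp at hu; omega)
          (badl_cons (badl_drop_pct hb (by simp)) (by decide)) heq
      by_cases hkI : c₂ = 'I'
      · subst hkI
        rw [chainK_I]
        intro heq
        rw [show jekyllScan ('%' :: 'I' :: t₂) = '0'::'3' :: jekyllScan t₂ from rfl] at heq
        simp only [List.cons.injEq, true_and] at heq
        exact ih t₂ (by simp at hu; omega)
          (badl_cons (badl_drop_pct hb (by simp)) (by decide)) heq
      by_cases hkM : c₂ = 'M'
      · subst hkM
        rw [chainK_M]
        intro heq
        rw [show jekyllScan ('%' :: 'M' :: t₂) = '0'::'4' :: jekyllScan t₂ from rfl] at heq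
        simp only [List.cons.injEq, true_and] at heq
        exact ih t₂ (by simp at hu; omega)
          (badl_cons (badl_drop_pct hb (by simp)) (by decide)) heq
      by_cases hkS : c₂ = 'S'
      · subst hkS
        rw [chainK_S]
        intro heq
        rw [show jekyllScan ('%' :: 'S' :: t₂) = '0'::'5' :: jekyllScan t₂ from rfl] at heq
        simp only [List.cons.injEq, true_and] at heq
        exact ih t₂ (by simp at hu; omega)
          (badl_cons (badl_drop_pct hb (by simp)) (by decide)) heq
      by_cases hkp : c₂ = 'p'
      · subst hkp
        rw [chainK_p]
        intro heq
        rw [show jekyllScan ('%' :: 'p' :: t₂) = 'P'::'M' :: jekyllScan t₂ from rfl] at heq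
        simp only [List.cons.injEq, true_and] at heq
        exact ih t₂ (by simp at hu; omega)
          (badl_cons (badl_drop_pct hb (by simp)) (by decide)) heq
      by_cases hdash : c₂ = '-'
      · subst hdash
        match t₂ with
        | [] => exact absurd hb (not_badl_short (by simp))
        | c₃ :: t₃ =>
        by_cases h3m : c₃ = 'm'
        · subst h3m
          rw [chainK3_m]
          intro heq
          rw [show jekyllScan ('%' :: '-' :: 'm' :: t₃) = '1' :: jekyllScan t₃ from rfl] at heq
          simp only [List.cons.injEq, true_and] at heq
          exact ih t₃ (by simp at hu; omega)
            (badl_cons (badl_cons (badl_drop_pct hb (by simp)) (by decide)) (by decide)) heq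
        by_cases h3d : c₃ = 'd'
        · subst h3d
          rw [chainK3_d]
          intro heq
          rw [show jekyllScan ('%' :: '-' :: 'd' :: t₃) = '2' :: jekyllScan t₃ from rfl] at heq
          simp only [List.cons.injEq, true_and] at heq
          exact ih t₃ (by simp at hu; omega)
            (badl_cons (badl_cons (badl_drop_pct hb (by simp)) (by decide)) (by decide)) heq
        rw [chain_dash h3m h3d, scan_dash_other t₃ h3m h3d]
        intro heq
        simp only [List.cons.injEq, true_and] at heq
        exact ih ('-' :: c₃ :: t₃) (by simp at hu ⊢; omega) (badl_drop_pct hb (by simp)) heq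
      have hns : c₂ ∉ (['%','-','Y','y','m','d','B','b','A','a','H','I','M','S','p'] : List Char) := by
        simp_all
      rw [chain_nonkey t₂ hns, scan_nonkey t₂ hns]
      intro heq
      simp only [List.cons.injEq, true_and] at heq
      exact ih (c₂ :: t₂) (by simp at hu ⊢; omega) (badl_drop_pct hb (by simp [h2])) heq

-- ---- bridges back to strings ----
lemma strchain_toList : ∀ (ps : List (String × String)) (s : String),
    (ps.foldl (fun r kv => PySem.Str.replace r kv.1 kv.2) s).toList =
      chainC (ps.map (fun kv => (kv.1.toList, kv.2.toList))) s.toList := by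
  intro ps
  induction ps with
  | nil => intro s; rfl
  | cons p ps ih =>
    intro s
    show (ps.foldl _ (PySem.Str.replace s p.1 p.2)).toList = _
    rw [ih (PySem.Str.replace s p.1 p.2)]
    simp only [List.map_cons]
    show chainC _ (PySem.Str.replace s p.1 p.2).toList =
      chainC _ (PySem.Chars.replace s.toList p.1.toList p.2.toList)
    rw [PySem.Str.toList_replace]

lemma mapping_toList :
    jekyllMapping.map (fun kv => (kv.1.toList, kv.2.toList)) = MC := by
  simp [jekyllMapping, MC]

lemma A_toList (fmt : String) :
    (jekyll_date_to_go_py fmt).toList = chainC MC fmt.toList := by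
  show (jekyllMapping.foldl _ fmt).toList = _
  rw [strchain_toList, mapping_toList]


-- ===== VERDICT (by name: the statement is the Claim_ definition above) =====
theorem jekyll_date_to_go_py_spec : Claim_unchanged_jekyll_date_to_go_py := by
  intro fmt _ hD
  have hnb : NoBad fmt.toList := by
    constructor
    · intro hin
      apply hD; left
      rw [PySem.Str.isIn_iff_infix]
      have : ("%%A".toList : List Char) = ['%','%','A'] := by decide
      rw [this]; exact hin
    · intro hin
      apply hD; right
      rw [PySem.Str.isIn_iff_infix]
      have : ("%%a".toList : List Char) = ['%','%','a'] := by decide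
      rw [this]; exact hin
  have h := chain_eq_scan (fmt.toList.length + 1) fmt.toList (by omega) hnb
  calc jekyll_date_to_go_py fmt
      = String.ofList (jekyll_date_to_go_py fmt).toList := (String.ofList_toList).symm
    _ = String.ofList (chainC MC fmt.toList) := by rw [A_toList]
    _ = String.ofList (jekyllScan fmt.toList) := by rw [h]
    _ = jekyll_date_to_go_py_alt fmt := rfl

set_option maxRecDepth 65536 in
theorem jekyll_date_to_go_py_changed : Claim_changed_jekyll_date_to_go_py := by
  unfold Claim_changed_jekyll_date_to_go_py; decide

theorem jekyll_date_to_go_py_tight : Claim_exact_jekyll_date_to_go_py := by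
  intro fmt _ hD heq
  have halt : (jekyll_date_to_go_py_alt fmt).toList = jekyllScan fmt.toList := by
    show (String.ofList (jekyllScan fmt.toList)).toList = _
    rw [String.toList_ofList]
  have htl : chainC MC fmt.toList = jekyllScan fmt.toList := by
    have h1 := A_toList fmt
    rw [heq, halt] at h1
    exact h1.symm
  have hbad : BadL fmt.toList := by
    rcases hD with h | h
    · left
      have h' := (PySem.Str.isIn_iff_infix _ _).mp h
      have he : ("%%A".toList : List Char) = ['%','%','A'] := by decide
      rwa [he] at h'
    · right
      have h' := (PySem.Str.isIn_iff_infix _ _).mp h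
      have he : ("%%a".toList : List Char) = ['%','%','a'] := by decide
      rwa [he] at h'
  exact chain_ne_scan (fmt.toList.length + 1) fmt.toList (by omega) hbad htl
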